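-- pv_equiv track=rewrite | github.com/bradykim7/Algorithm | exitMP/programmers_code_67256.py | solution
-- ===== SOURCE A (Python) =====
-- def solution(numbers, hand):
--     answer = ""
--     L = ["1", "4", "7", "*"]
--     R = ["3", "6", "9", "#"]
--     O = [["1", "2", "3"], ["4", "5", "6"], ["7", "8", "9"], ["*", "0", "#"]]
--     pre = {"L": "*", "R": "#"}
--     for i in numbers:
--         i = str(i)
--         if i in L:
--             answer += "L"
--             pre["L"] = i
--         elif i in R:
--             answer += "R"
--             pre["R"] = i
--         else:
--             for x in O :
--                 if pre["L"] in x: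
--                     ll = [O.index(x), x.index(pre["L"])]
--                 if pre["R"] in x:
--                     rl = [O.index(x), x.index(pre["R"])]
--                 if i in x:
--                     ml = [O.index(x), x.index(i)]
--             lg = abs(ll[0] - ml[0]) +  abs(ll[1]-ml[1])
--             rg = abs(rl[0] - ml[0]) +  abs(rl[1]-ml[1])
--             if lg < rg:
--                 answer += "L"
--                 pre["L"] = i
--             elif lg > rg:
--                 answer += "R"
--                 pre["R"] = i
--             else:
--                 el = "R" if hand == "right" else "L"
--                 answer += el
--                 pre[el] = i
--     return answer
-- ===== SOURCE B (Python) =====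
-- def solution(numbers, hand):
--     # Keypad keys as indices 0..11 in row-major order (key i at row i//3, col i%3);
--     # digit d sits at index 10 if d == 0 else d - 1.
--     # Precompute the COMPLETE transition automaton over all 12*12 thumb states once,
--     # then run the input through it with pure table lookups.
--     tie = "R" if hand == "right" else "L"
--
--     def trans(l, r, p):
--         if p % 3 == 0:
--             return ("L", p, r)
--         if p % 3 == 2:
--             return ("R", l, p)
--         dl = abs(l // 3 - p // 3) + abs(l % 3 - p % 3)
--         dr = abs(r // 3 - p // 3) + abs(r % 3 - p % 3)
--         if dl < dr:
--             return ("L", p, r)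
--         if dr < dl:
--             return ("R", l, p)
--         if tie == "L":
--             return ("L", p, r)
--         return ("R", l, p)
--
--     table = [trans(l, r, 10 if d == 0 else d - 1)
--              for l in range(12) for r in range(12) for d in range(10)]
--
--     l, r = 9, 11  # '*' and '#'
--     out = []
--     for n in numbers:
--         ch, l, r = table[(l * 12 + r) * 10 + n]
--         out.append(ch)
--     return "".join(out)
-- ===== Notes on version B (the rewrite author's own statement) =====
-- stated objective: alternative
-- what changed: B precomputes the complete transition automaton (a flat table over all 12x12 thumb-position states and 10 digits, keys encoded as row-major indices) once, and the main loop over numbers is pure table lookups with no per-digit decision logic or grid scanning.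
-- outside the precondition, e.g. on solution([2, 10], 'right'): A returns 'RR', B returns 'RL'; on solution([10], 'right'): A raises UnboundLocalError, B returns 'L'
import Mathlib
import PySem

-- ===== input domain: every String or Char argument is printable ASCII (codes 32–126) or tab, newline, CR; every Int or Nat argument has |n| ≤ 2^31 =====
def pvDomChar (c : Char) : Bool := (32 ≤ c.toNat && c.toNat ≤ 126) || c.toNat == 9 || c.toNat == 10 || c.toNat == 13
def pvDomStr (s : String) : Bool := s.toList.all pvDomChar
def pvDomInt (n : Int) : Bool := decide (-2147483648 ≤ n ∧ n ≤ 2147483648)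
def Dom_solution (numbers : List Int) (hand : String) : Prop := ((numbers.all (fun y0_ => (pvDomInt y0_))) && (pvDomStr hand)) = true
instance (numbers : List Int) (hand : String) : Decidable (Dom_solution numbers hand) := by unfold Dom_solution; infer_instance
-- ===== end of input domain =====

-- B precomputes the complete transition automaton over all 12x12 thumb states once;
-- the main loop is pure table lookups (objective: alternative).

-- ===== PORT A =====
-- the literal grid O of A
def solGridO : List (List String) :=
  [["1", "2", "3"], ["4", "5", "6"], ["7", "8", "9"], ["*", "0", "#"]]

-- A's inner 'for x in O' scan; ll/rl/ml start unbound (none). Under Pre_ they are always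
-- assigned; the .getD defaults below are never reached there (Python raises outside Pre_).
def solScanA (preL preR i : String) :
    Option (Int × Int) × Option (Int × Int) × Option (Int × Int) :=
  solGridO.foldl
    (fun (st : Option (Int × Int) × Option (Int × Int) × Option (Int × Int)) x =>
      let ll := if preL ∈ x then
          some ((((PySem.List.index? solGridO x).getD 0 : Nat) : Int),
                (((PySem.List.index? x preL).getD 0 : Nat) : Int)) else st.1
      let rl := if preR ∈ x then
          some ((((PySem.List.index? solGridO x).getD 0 : Nat) : Int),
                (((PySem.List.index? x preR).getD 0 : Nat) : Int)) else st.2.1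
      let ml := if i ∈ x then
          some ((((PySem.List.index? solGridO x).getD 0 : Nat) : Int),
                (((PySem.List.index? x i).getD 0 : Nat) : Int)) else st.2.2
      (ll, rl, ml))
    (none, none, none)

-- one iteration of A's 'for i in numbers' loop; state = (answer, pre["L"], pre["R"])
def solStepA (hand : String) (st : String × String × String) (n : Int) :
    String × String × String :=
  let i := PySem.Int.toStr n
  if i ∈ ["1", "4", "7", "*"] then (st.1 ++ "L", i, st.2.2)
  else if i ∈ ["3", "6", "9", "#"] then (st.1 ++ "R", st.2.1, i)
  else
    let p := solScanA st.2.1 st.2.2 i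
    let ll := p.1.getD (0, 0)
    let rl := p.2.1.getD (0, 0)
    let ml := p.2.2.getD (0, 0)
    let lg := |ll.1 - ml.1| + |ll.2 - ml.2|
    let rg := |rl.1 - ml.1| + |rl.2 - ml.2|
    if lg < rg then (st.1 ++ "L", i, st.2.2)
    else if lg > rg then (st.1 ++ "R", st.2.1, i)
    else if hand = "right" then (st.1 ++ "R", st.2.1, i)
    else (st.1 ++ "L", i, st.2.2)

def solution (numbers : List Int) (hand : String) : String :=
  (numbers.foldl (solStepA hand) ("", "*", "#")).1

-- ===== PORT B =====
-- Source B's inner helper trans(l, r, p): decision for thumbs at key indices l, r and key p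
def solAltTrans (tie : String) (l r p : Int) : String × Int × Int :=
  if PySem.Int.mod p 3 = 0 then ("L", p, r)
  else if PySem.Int.mod p 3 = 2 then ("R", l, p)
  else
    let dl := |PySem.Int.floordiv l 3 - PySem.Int.floordiv p 3| +
              |PySem.Int.mod l 3 - PySem.Int.mod p 3|
    let dr := |PySem.Int.floordiv r 3 - PySem.Int.floordiv p 3| +
              |PySem.Int.mod r 3 - PySem.Int.mod p 3|
    if dl < dr then ("L", p, r)
    else if dr < dl then ("R", l, p)
    else if tie = "L" then ("L", p, r)
    else ("R", l, p)

-- the comprehension building the full 12*12*10 transition table, innermost loop first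
def solAltRow (tie : String) (l r : Int) : List (String × Int × Int) :=
  (PySem.List.pyRange 0 10 1).map fun d =>
    solAltTrans tie l r (if d = 0 then 10 else d - 1)

def solAltBlock (tie : String) (l : Int) : List (String × Int × Int) :=
  (PySem.List.pyRange 0 12 1).flatMap fun r => solAltRow tie l r

def solAltTable (tie : String) : List (String × Int × Int) :=
  (PySem.List.pyRange 0 12 1).flatMap fun l => solAltBlock tie l

-- main loop: state = (out, l, r); table[(l*12+r)*10+n] raises IndexError only outside
-- Pre_ for n too negative (the .getD default is never reached inside Pre_)
def solution_alt (numbers : List Int) (hand : String) : String :=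
  let tie := if hand = "right" then "R" else "L"
  let table := solAltTable tie
  let st := numbers.foldl
    (fun (st : List String × Int × Int) n =>
      let t := (PySem.List.pyGet? table ((st.2.1 * 12 + st.2.2) * 10 + n)).getD ("", 0, 0)
      (st.1 ++ [t.1], t.2.1, t.2.2)) ([], 9, 11)
  PySem.Str.join "" st.1

-- ===== PRECONDITION & SPEC =====
-- Pre_ excludes numbers outside the keypad digits 0..9: there A raises UnboundLocalError
-- or (after a previous middle key) returns a value computed from stale leftover grid
-- positions, while B's table lookup lands on an unrelated entry or raises IndexError.
def Pre_solution (numbers : List Int) (hand : String) : Prop :=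
  ∀ n ∈ numbers, 0 ≤ n ∧ n ≤ 9
instance (numbers : List Int) (hand : String) : Decidable (Pre_solution numbers hand) := by
  unfold Pre_solution; infer_instance

def pvWitness_solution : List Int × String := ([1, 3, 4, 5, 8, 2, 1, 4, 5, 9, 5], "right")

def Spec_solution (numbers : List Int) (hand : String) (out : String) : Prop :=
  out = solution_alt numbers hand
instance (numbers : List Int) (hand : String) (out : String) :
    Decidable (Spec_solution numbers hand out) := by unfold Spec_solution; infer_instance

-- ===== CLAIM (what is proved, stated in full; the proofs are below) =====
def Claim_equal_solution : Prop := ∀ (numbers : List Int) (hand : String),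
  Dom_solution numbers hand → Pre_solution numbers hand →
  Spec_solution numbers hand (solution numbers hand)

-- ===== LEMMAS AND PROOFS =====

-- where table[(l*12+r)*10+n] lands: lengths of the comprehension's layers …
theorem row_len (tie : String) (l r : Int) : (solAltRow tie l r).length = 10 := by
  simp [solAltRow, PySem.List.length_pyRange_one]

theorem block_len (tie : String) (l : Int) : (solAltBlock tie l).length = 120 := by
  simp [solAltBlock, List.length_flatMap, row_len, List.map_const',
    PySem.List.length_pyRange_one]

-- … indexing into one l-block …
theorem block_get (tie : String) (l : Int) (r n : Nat) (hr : r < 12) (hn : n < 10) :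
    (solAltBlock tie l)[r * 10 + n]? =
      some (solAltTrans tie l r (if (n : Int) = 0 then 10 else (n : Int) - 1)) := by
  have hsplit : PySem.List.pyRange 0 12 1 =
      PySem.List.pyRange 0 r 1 ++ PySem.List.pyRange r 12 1 :=
    PySem.List.pyRange_one_append 0 r 12 (by exact_mod_cast Nat.zero_le r)
      (by exact_mod_cast hr.le)
  have hcons : PySem.List.pyRange (r : Int) 12 1 =
      (r : Int) :: PySem.List.pyRange (r + 1) 12 1 :=
    PySem.List.pyRange_one_cons (by exact_mod_cast hr)
  have hpre : ((PySem.List.pyRange 0 r 1).flatMap fun x => solAltRow tie l x).length =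
      r * 10 := by
    simp [List.length_flatMap, row_len, List.map_const', PySem.List.length_pyRange_one,
      List.sum_replicate]
  rw [solAltBlock, hsplit, List.flatMap_append, hcons, List.flatMap_cons,
    List.getElem?_append_right (by rw [hpre]; omega)]
  rw [hpre, Nat.add_sub_cancel_left, List.getElem?_append_left (by rw [row_len]; omega)]
  have := PySem.List.getElem?_map_pyRange_zero
    (fun d => solAltTrans tie l r (if d = 0 then 10 else d - 1)) 10 n hn
  simpa [solAltRow] using this

-- … and the full table: table[(l*12+r)*10+n] is trans(l, r, pos-of-digit n)
theorem table_get (tie : String) (l r n : Nat) (hl : l < 12) (hr : r < 12) (hn : n < 10) :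
    PySem.List.pyGet? (solAltTable tie) ((((l : Int)) * 12 + r) * 10 + n) =
      some (solAltTrans tie l r (if (n : Int) = 0 then 10 else (n : Int) - 1)) := by
  have hsplit : PySem.List.pyRange 0 12 1 =
      PySem.List.pyRange 0 l 1 ++ PySem.List.pyRange l 12 1 :=
    PySem.List.pyRange_one_append 0 l 12 (by exact_mod_cast Nat.zero_le l)
      (by exact_mod_cast hl.le)
  have hpre : ((PySem.List.pyRange 0 l 1).flatMap fun x => solAltBlock tie x).length =
      l * 120 := by
    simp [List.length_flatMap, block_len, List.map_const', PySem.List.length_pyRange_one,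
      List.sum_replicate]
  have hidx : (((l : Int)) * 12 + r) * 10 + n =
      (((((PySem.List.pyRange 0 l 1).flatMap fun x => solAltBlock tie x).length : Nat) : Int)) +
      ((r * 10 + n : Nat) : Int) := by
    rw [hpre]; push_cast; ring
  rw [solAltTable, hsplit, List.flatMap_append, hidx, PySem.List.pyGet?_append_right]
  have hcons : PySem.List.pyRange (l : Int) 12 1 =
      (l : Int) :: PySem.List.pyRange (l + 1) 12 1 :=
    PySem.List.pyRange_one_cons (by exact_mod_cast hl)
  rw [hcons, List.flatMap_cons, List.getElem?_append_left (by rw [block_len]; omega)]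
  exact block_get tie l r n hr hn

-- A's step stripped of the accumulated answer and of `hand` (b = decide (hand = "right")):
-- returns (appended letter, new pre["L"], new pre["R"])
def stepACore (b : Bool) (pL pR : String) (n : Int) : String × String × String :=
  let i := PySem.Int.toStr n
  if i ∈ ["1", "4", "7", "*"] then ("L", i, pR)
  else if i ∈ ["3", "6", "9", "#"] then ("R", pL, i)
  else
    let p := solScanA pL pR i
    let ll := p.1.getD (0, 0)
    let rl := p.2.1.getD (0, 0)
    let ml := p.2.2.getD (0, 0)
    let lg := |ll.1 - ml.1| + |ll.2 - ml.2|
    let rg := |rl.1 - ml.1| + |rl.2 - ml.2|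
    if lg < rg then ("L", i, pR)
    else if lg > rg then ("R", pL, i)
    else if b then ("R", pL, i)
    else ("L", i, pR)

-- B's step stripped of the accumulated output: the table row fetched for (l, r, n)
def stepBCore (b : Bool) (l r n : Int) : String × Int × Int :=
  (PySem.List.pyGet? (solAltTable (if b then "R" else "L")) ((l * 12 + r) * 10 + n)).getD
    ("", 0, 0)

-- in range, B's table lookup IS its builder trans applied to the decoded triple
theorem stepB_eq_trans (b : Bool) (l r n : Int)
    (hl0 : 0 ≤ l) (hl : l < 12) (hr0 : 0 ≤ r) (hr : r < 12) (hn0 : 0 ≤ n) (hn : n < 10) :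
    stepBCore b l r n =
      solAltTrans (if b then "R" else "L") l r (if n = 0 then 10 else n - 1) := by
  lift l to ℕ using hl0
  lift r to ℕ using hr0
  lift n to ℕ using hn0
  rw [stepBCore, table_get (if b then "R" else "L") l r n
    (by exact_mod_cast hl) (by exact_mod_cast hr) (by exact_mod_cast hn)]
  rfl

theorem stepA_split (hand ans pL pR : String) (n : Int) :
    solStepA hand (ans, pL, pR) n =
      (ans ++ (stepACore (decide (hand = "right")) pL pR n).1,
       (stepACore (decide (hand = "right")) pL pR n).2.1,
       (stepACore (decide (hand = "right")) pL pR n).2.2) := by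
  simp only [solStepA, stepACore]
  split_ifs <;> simp_all

theorem stepB_split (hand : String) (out : List String) (l r n : Int) :
    (fun (st : List String × Int × Int) n =>
      let t := (PySem.List.pyGet? (solAltTable (if hand = "right" then "R" else "L"))
                  ((st.2.1 * 12 + st.2.2) * 10 + n)).getD ("", 0, 0)
      (st.1 ++ [t.1], t.2.1, t.2.2)) (out, l, r) n =
      (out ++ [(stepBCore (decide (hand = "right")) l r n).1],
       (stepBCore (decide (hand = "right")) l r n).2.1,
       (stepBCore (decide (hand = "right")) l r n).2.2) := by
  simp only [stepBCore]
  split_ifs <;> simp_all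

-- the twelve keypad keys: either thumb may rest on any of them
def solKeys : List String := ["1", "2", "3", "4", "5", "6", "7", "8", "9", "0", "*", "#"]

-- row-major key index of a (single-key) string on the keypad, used only by the proof
def solIdxOf (s : String) : Int :=
  if s = "1" then 0 else if s = "2" then 1 else if s = "3" then 2
  else if s = "4" then 3 else if s = "5" then 4 else if s = "6" then 5
  else if s = "7" then 6 else if s = "8" then 7 else if s = "9" then 8
  else if s = "*" then 9 else if s = "0" then 10 else 11

-- the finite heart of the equivalence, with B's step in trans form: all concrete
-- cases, checked by the kernel
theorem core_eq' (b : Bool) (pL pR : String) (n : Int)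
    (hL : pL ∈ solKeys) (hR : pR ∈ solKeys)
    (h0 : 0 ≤ n) (h9 : n ≤ 9) :
    (stepACore b pL pR n).1 =
      (solAltTrans (if b then "R" else "L") (solIdxOf pL) (solIdxOf pR)
        (if n = 0 then 10 else n - 1)).1 ∧
    (solAltTrans (if b then "R" else "L") (solIdxOf pL) (solIdxOf pR)
        (if n = 0 then 10 else n - 1)).2.1 = solIdxOf (stepACore b pL pR n).2.1 ∧
    (solAltTrans (if b then "R" else "L") (solIdxOf pL) (solIdxOf pR)
        (if n = 0 then 10 else n - 1)).2.2 = solIdxOf (stepACore b pL pR n).2.2 ∧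
    (stepACore b pL pR n).2.1 ∈ solKeys ∧
    (stepACore b pL pR n).2.2 ∈ solKeys := by
  have H : ∀ n ∈ [(0:Int),1,2,3,4,5,6,7,8,9], ∀ pL ∈ solKeys, ∀ pR ∈ solKeys,
      (stepACore b pL pR n).1 =
        (solAltTrans (if b then "R" else "L") (solIdxOf pL) (solIdxOf pR)
          (if n = 0 then 10 else n - 1)).1 ∧
      (solAltTrans (if b then "R" else "L") (solIdxOf pL) (solIdxOf pR)
          (if n = 0 then 10 else n - 1)).2.1 = solIdxOf (stepACore b pL pR n).2.1 ∧
      (solAltTrans (if b then "R" else "L") (solIdxOf pL) (solIdxOf pR)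
          (if n = 0 then 10 else n - 1)).2.2 = solIdxOf (stepACore b pL pR n).2.2 ∧
      (stepACore b pL pR n).2.1 ∈ solKeys ∧
      (stepACore b pL pR n).2.2 ∈ solKeys := by
    cases b <;> decide
  have hn : n ∈ [(0:Int),1,2,3,4,5,6,7,8,9] := by interval_cases n <;> simp
  exact H n hn pL hL pR hR

-- key indices are in range
theorem idx_bounds (s : String) (h : s ∈ solKeys) : 0 ≤ solIdxOf s ∧ solIdxOf s < 12 := by
  fin_cases h <;> decide

-- core_eq' restated against B's real (table-lookup) step
theorem core_eq (b : Bool) (pL pR : String) (n : Int)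
    (hL : pL ∈ solKeys) (hR : pR ∈ solKeys)
    (h0 : 0 ≤ n) (h9 : n ≤ 9) :
    (stepACore b pL pR n).1 = (stepBCore b (solIdxOf pL) (solIdxOf pR) n).1 ∧
    (stepBCore b (solIdxOf pL) (solIdxOf pR) n).2.1 = solIdxOf (stepACore b pL pR n).2.1 ∧
    (stepBCore b (solIdxOf pL) (solIdxOf pR) n).2.2 = solIdxOf (stepACore b pL pR n).2.2 ∧
    (stepACore b pL pR n).2.1 ∈ solKeys ∧
    (stepACore b pL pR n).2.2 ∈ solKeys := by
  obtain ⟨hl0, hl⟩ := idx_bounds pL hL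
  obtain ⟨hr0, hr⟩ := idx_bounds pR hR
  rw [stepB_eq_trans b _ _ n hl0 hl hr0 hr h0 (by omega)]
  exact core_eq' b pL pR n hL hR h0 h9

-- invariant tying A's state (answer, pre["L"], pre["R"]) to B's (out, l, r)
def solInv (a : String × String × String) (c : List String × Int × Int) : Prop :=
  a.1 = PySem.Str.join "" c.1 ∧ c.2.1 = solIdxOf a.2.1 ∧ c.2.2 = solIdxOf a.2.2 ∧
  a.2.1 ∈ solKeys ∧ a.2.2 ∈ solKeys

theorem chars_join_nil_append (ls : List (List Char)) (cs : List Char) :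
    PySem.Chars.join [] (ls ++ [cs]) = PySem.Chars.join [] ls ++ cs := by
  induction ls with
  | nil => simp [PySem.Chars.join_singleton, PySem.Chars.join_nil]
  | cons x xs ih =>
    cases xs with
    | nil => simp [PySem.Chars.join_cons_cons, PySem.Chars.join_singleton]
    | cons y ys =>
      simp only [List.cons_append, PySem.Chars.join_cons_cons] at *
      rw [ih]; simp

theorem join_append_singleton (xs : List String) (s : String) :
    PySem.Str.join "" (xs ++ [s]) = PySem.Str.join "" xs ++ s := by
  apply String.toList_inj.mp
  simp only [PySem.Str.toList_join, String.toList_append, List.map_append, List.map_cons,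
    List.map_nil]
  rw [show ("" : String).toList = [] from rfl, chars_join_nil_append]

theorem solStep_inv (hand : String) (a : String × String × String)
    (c : List String × Int × Int) (n : Int)
    (h : solInv a c) (h0 : 0 ≤ n) (h9 : n ≤ 9) :
    solInv (solStepA hand a n)
      ((fun (st : List String × Int × Int) n =>
        let t := (PySem.List.pyGet? (solAltTable (if hand = "right" then "R" else "L"))
                    ((st.2.1 * 12 + st.2.2) * 10 + n)).getD ("", 0, 0)
        (st.1 ++ [t.1], t.2.1, t.2.2)) c n) := by
  obtain ⟨ans, pL, pR⟩ := a
  obtain ⟨out, l, r⟩ := c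
  obtain ⟨h1, h2, h3, h4, h5⟩ := h
  simp only at h1 h2 h3 h4 h5
  subst h1 h2 h3
  obtain ⟨c1, c2, c3, c4, c5⟩ := core_eq (decide (hand = "right")) pL pR n h4 h5 h0 h9
  rw [stepA_split, stepB_split]
  refine ⟨?_, c2, c3, c4, c5⟩
  rw [join_append_singleton, c1]

theorem solFold_inv (hand : String) (nums : List Int) (a : String × String × String)
    (c : List String × Int × Int)
    (h : solInv a c) (hp : ∀ n ∈ nums, 0 ≤ n ∧ n ≤ 9) :
    solInv (nums.foldl (solStepA hand) a)
      (nums.foldl (fun (st : List String × Int × Int) n =>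
        let t := (PySem.List.pyGet? (solAltTable (if hand = "right" then "R" else "L"))
                    ((st.2.1 * 12 + st.2.2) * 10 + n)).getD ("", 0, 0)
        (st.1 ++ [t.1], t.2.1, t.2.2)) c) := by
  induction nums generalizing a c with
  | nil => simpa using h
  | cons x xs ih =>
    simp only [List.foldl_cons]
    exact ih _ _ (solStep_inv hand a c x h (hp x (by simp)).1 (hp x (by simp)).2)
      (fun n hn => hp n (by simp [hn]))

-- ===== VERDICT (by name: the statement is the Claim_ definition above) =====
theorem solution_spec : Claim_equal_solution := by
  intro numbers hand _ hpre
  unfold Spec_solution solution solution_alt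
  have := (solFold_inv hand numbers ("", "*", "#") ([], 9, 11)
    (by simp [solInv, solIdxOf, solKeys, PySem.Str.join, PySem.Chars.join, List.intercalate]) hpre).1
  simpa using this
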